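-- pv_equiv track=rewrite | github.com/aileenkuang/nyt-analysis | nyt-analysis.py | parse
-- ===== SOURCE A (Python) =====
-- def parse(string):
--     """
--     Takes in a string (author name)
--     Parses and returns list of names in the string
--
--     Does not account for "edited and illustrated by"
--     """
--     if ", " in string:
--         names = string.split(", ")
--         list = []
--         for name in names:
--             list.extend(parse(name))
--         return list
--     elif " and " in string:
--         names = string.split(" and ")
--         list = []
--         for name in names:
--             list.extend(parse(name))
--         return list
--     else:
--         return [string]
-- ===== SOURCE B (Python) =====
-- import re
--
-- def parse(string):
--     """
--     Takes in a string (author name)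
--     Parses and returns list of names in the string
--
--     Does not account for "edited and illustrated by"
--     """
--     return re.split(r', | and ', string)
-- ===== Notes on version B (the rewrite author's own statement) =====
-- stated objective: idiomatic
-- what changed: A recursively splits on comma-space and then re-splits every piece on the five-character and-delimiter; B is a single left-to-right re.split scan with the two literal delimiters as alternatives, comma tried first at each position.
import Mathlib
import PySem

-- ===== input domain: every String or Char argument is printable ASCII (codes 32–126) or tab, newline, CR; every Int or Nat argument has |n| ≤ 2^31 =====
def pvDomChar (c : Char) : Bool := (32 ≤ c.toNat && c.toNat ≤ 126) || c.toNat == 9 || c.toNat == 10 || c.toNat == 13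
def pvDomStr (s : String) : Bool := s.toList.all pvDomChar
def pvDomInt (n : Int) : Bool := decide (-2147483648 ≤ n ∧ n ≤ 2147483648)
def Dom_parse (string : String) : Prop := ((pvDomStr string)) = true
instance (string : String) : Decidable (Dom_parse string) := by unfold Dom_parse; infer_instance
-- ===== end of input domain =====

-- B replaces A's two-level recursion (split on ", ", then recursively on " and ") by a single
-- left-to-right scan (re.split(r', | and ', string)); same return value, one linear pass.

-- ===== PORT A =====
-- A's recursion: split on ", " and recurse on each piece, else split on " and " and recurse,
-- else return [string].  The fuel argument only makes the recursion structural: pieces of a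
-- split never contain their separator, so the Python recursion depth never exceeds 3 and
-- parseF 3 is exactly A (this is what the equivalence proof below establishes step by step).
def parseF : Nat → String → List String
  | 0, string => [string]
  | Nat.succ n, string =>
    if PySem.Str.isIn ", " string then
      -- names = string.split(", "); list = []; for name in names: list.extend(parse(name))
      ((PySem.Chars.splitOn string.toList (", ".toList)).map String.ofList).foldl
        (fun list name => list ++ parseF n name) []
    else if PySem.Str.isIn " and " string then
      ((PySem.Chars.splitOn string.toList (" and ".toList)).map String.ofList).foldl
        (fun list name => list ++ parseF n name) []
    else [string]

def parse (string : String) : List String := parseF 3 string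

-- ===== PORT B =====
-- Source B is `re.split(r', | and ', string)`: one left-to-right scan; at each position the
-- alternative ', ' is tried first, then ' and ', otherwise the character joins the current
-- piece.  Ported by hand over List Char (exact: both patterns are literal ASCII strings).
def reSplit : List Char → List (List Char)
  | [] => [[]]
  | c :: rest =>
    if [',', ' '].isPrefixOf (c :: rest) then
      [] :: reSplit (List.drop 1 rest)
    else if [' ', 'a', 'n', 'd', ' '].isPrefixOf (c :: rest) then
      [] :: reSplit (List.drop 4 rest)
    else
      (reSplit rest).modifyHead (c :: ·)
  termination_by cs => cs.length
  decreasing_by all_goals simp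

def parse_alt (string : String) : List String := (reSplit string.toList).map String.ofList

-- ===== PRECONDITION & SPEC =====
def Spec_parse (string : String) (out : List String) : Prop := out = parse_alt string
instance (string : String) (out : List String) : Decidable (Spec_parse string out) := by unfold Spec_parse; infer_instance

-- ===== CLAIM (what is proved, stated in full; the proofs are below) =====
def Claim_equal_parse : Prop := ∀ (string : String), Dom_parse string → Spec_parse string (parse string)

-- ===== LEMMAS AND PROOFS =====

-- Clean single-separator splitter (separator passed as head :: tail so it is nonempty);
-- `PySem.Chars.splitOn` is proved equal to it below.
def sp (s0 : Char) (st : List Char) : List Char → List (List Char)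
  | [] => [[]]
  | c :: rest =>
    if (s0 :: st).isPrefixOf (c :: rest) then
      [] :: sp s0 st (List.drop st.length rest)
    else
      (sp s0 st rest).modifyHead (c :: ·)
  termination_by cs => cs.length
  decreasing_by all_goals simp

theorem sp_shape (s0 : Char) (st : List Char) (cs : List Char) :
    ∃ h t, sp s0 st cs = h :: t := by
  induction cs using sp.induct s0 st with
  | case1 => exact ⟨[], [], by rw [sp]⟩
  | case2 c rest hpre ih =>
      exact ⟨[], sp s0 st (List.drop st.length rest), by rw [sp]; simp [hpre]⟩
  | case3 c rest hpre ih =>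
      obtain ⟨h, t, hs⟩ := ih
      exact ⟨c :: h, t, by rw [sp]; simp [hpre, hs]⟩

theorem sp_head_prefix (s0 : Char) (st : List Char) (cs : List Char) {h : List Char}
    {t : List (List Char)} (hs : sp s0 st cs = h :: t) : h <+: cs := by
  induction cs using sp.induct s0 st generalizing h t with
  | case1 => rw [sp] at hs; simp at hs; simp [hs.1]
  | case2 c rest hpre ih =>
      rw [sp] at hs; simp [hpre] at hs; simp [hs.1]
  | case3 c rest hpre ih =>
      obtain ⟨h', t', hs'⟩ := sp_shape s0 st rest
      rw [sp] at hs; rw [hs'] at hs; simp [hpre] at hs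
      rcases hs with ⟨hh, -⟩
      subst hh
      exact List.cons_prefix_cons.mpr ⟨rfl, ih hs'⟩

-- every piece is a contiguous substring of the input
theorem sp_mem_infix (s0 : Char) (st : List Char) (cs : List Char) :
    ∀ p ∈ sp s0 st cs, p <:+: cs := by
  induction cs using sp.induct s0 st with
  | case1 =>
      intro p hp
      rw [sp] at hp; simp at hp; simp [hp]
  | case2 c rest hpre ih =>
      intro p hp
      rw [sp] at hp; simp [hpre] at hp
      rcases hp with hp | hp
      · simp [hp]
      · exact ((ih p hp).trans (List.drop_suffix _ _).isInfix).trans (List.suffix_cons c rest).isInfix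
  | case3 c rest hpre ih =>
      intro p hp
      obtain ⟨h', t', hs'⟩ := sp_shape s0 st rest
      rw [sp, hs'] at hp; simp [hpre] at hp
      rcases hp with hp | hp
      · subst hp
        exact (List.cons_prefix_cons.mpr ⟨rfl, sp_head_prefix s0 st rest hs'⟩).isInfix
      · exact ((ih p (by rw [hs']; exact List.mem_cons_of_mem _ hp)).trans
          (List.suffix_cons c rest).isInfix)

-- no piece contains the separator
theorem sp_mem_not_infix (s0 : Char) (st : List Char) (cs : List Char) :
    ∀ p ∈ sp s0 st cs, ¬ (s0 :: st) <:+: p := by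
  induction cs using sp.induct s0 st with
  | case1 =>
      intro p hp
      rw [sp] at hp; simp at hp; subst hp
      intro hinf
      have := List.eq_nil_of_infix_nil hinf
      simp at this
  | case2 c rest hpre ih =>
      intro p hp
      rw [sp] at hp; simp [hpre] at hp
      rcases hp with hp | hp
      · subst hp
        intro hinf
        have := List.eq_nil_of_infix_nil hinf
        simp at this
      · exact ih p hp
  | case3 c rest hpre ih =>
      intro p hp
      obtain ⟨h', t', hs'⟩ := sp_shape s0 st rest
      rw [sp, hs'] at hp; simp [hpre] at hp
      rcases hp with hp | hp
      · subst hp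
        intro hinf
        rcases List.infix_cons_iff.mp hinf with hpre' | hinf'
        · -- a prefix of c :: h' is a prefix of c :: rest, contradicting hpre
          have : (s0 :: st) <+: c :: rest :=
            hpre'.trans (List.cons_prefix_cons.mpr ⟨rfl, sp_head_prefix s0 st rest hs'⟩)
          rw [← List.isPrefixOf_iff_prefix] at this
          simp [this] at hpre
        · exact ih h' (by rw [hs']; exact List.mem_cons_self) hinf'
      · exact ih p (by rw [hs']; exact List.mem_cons_of_mem _ hp)

-- if the separator does not occur, the input is the single piece
theorem sp_of_not_infix (s0 : Char) (st : List Char) (cs : List Char)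
    (h : ¬ (s0 :: st) <:+: cs) : sp s0 st cs = [cs] := by
  induction cs using sp.induct s0 st with
  | case1 => rw [sp]
  | case2 c rest hpre ih =>
      exact absurd (List.isPrefixOf_iff_prefix.mp hpre).isInfix h
  | case3 c rest hpre ih =>
      rw [sp, ih (fun hinf => h (hinf.trans (List.suffix_cons c rest).isInfix))]
      simp [hpre]

-- PySem.Chars.splitOn.go with enough fuel computes sp
theorem go_eq_sp (s0 : Char) (st : List Char) :
    ∀ (fuel : Nat) (cs cur : List Char) (acc : List (List Char)), cs.length ≤ fuel →
    PySem.Chars.splitOn.go (s0 :: st) fuel cs cur acc =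
      acc.reverse ++ (sp s0 st cs).modifyHead (fun h => cur.reverse ++ h) := by
  intro fuel
  induction fuel with
  | zero =>
      intro cs cur acc hlen
      have : cs = [] := List.eq_nil_of_length_eq_zero (Nat.le_zero.mp hlen)
      subst this
      rw [PySem.Chars.splitOn.go.eq_def, sp]
      simp
  | succ n ih =>
      intro cs cur acc hlen
      match cs with
      | [] =>
          rw [PySem.Chars.splitOn.go.eq_def, sp]; simp
      | c :: rest =>
          rw [PySem.Chars.splitOn.go.eq_def]
          by_cases hpre : (s0 :: st).isPrefixOf (c :: rest)
          · simp only [hpre, if_true]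
            have hdrop : List.drop (s0 :: st).length (c :: rest) = List.drop st.length rest := by
              simp
            have hl2 : (List.drop st.length rest).length ≤ n := by
              simp at hlen ⊢; omega
            rw [hdrop, ih (List.drop st.length rest) [] (cur.reverse :: acc) hl2]
            obtain ⟨h, t, hs⟩ := sp_shape s0 st (List.drop st.length rest)
            rw [sp]; simp [hpre, hs]
          · simp only [hpre]
            have hl2 : rest.length ≤ n := by simp at hlen; omega
            rw [ih rest (c :: cur) acc hl2]
            obtain ⟨h, t, hs⟩ := sp_shape s0 st rest
            rw [sp]; simp [hpre, hs]

theorem splitOn_eq_sp (s0 : Char) (st : List Char) (cs : List Char) :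
    PySem.Chars.splitOn cs (s0 :: st) = sp s0 st cs := by
  rw [PySem.Chars.splitOn, go_eq_sp s0 st _ _ _ _ (by omega)]
  obtain ⟨h, t, hs⟩ := sp_shape s0 st cs
  simp [hs]

-- the comma-scan walks straight through " and " (none of its characters is ',')
theorem sp_comma_and_append (t : List Char) :
    sp ',' [' '] ([' ', 'a', 'n', 'd', ' '] ++ t) =
      (sp ',' [' '] t).modifyHead (fun h => [' ', 'a', 'n', 'd', ' '] ++ h) := by
  obtain ⟨h, tl, hs⟩ := sp_shape ',' [' '] t
  simp only [List.cons_append]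
  rw [sp, sp, sp, sp, sp]
  simp [List.isPrefixOf, hs]

-- the " and "-scan fires on a piece that starts with " and "
theorem spA_and_append (h : List Char) :
    sp ' ' ['a','n','d',' '] ([' ','a','n','d',' '] ++ h) = [] :: sp ' ' ['a','n','d',' '] h := by
  simp only [List.cons_append]
  rw [sp]
  have hpre : ([' ','a','n','d',' '] : List Char).isPrefixOf (' '::'a'::'n'::'d'::' '::h) = true := by
    simp [List.isPrefixOf]
  simp [hpre]

-- THE CORE: splitting on ", " and then each piece on " and " is the one-pass two-pattern scan
theorem flatMap_sp_eq_reSplit (cs : List Char) :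
    (sp ',' [' '] cs).flatMap (sp ' ' ['a', 'n', 'd', ' ']) = reSplit cs := by
  induction cs using reSplit.induct with
  | case1 => rw [reSplit, sp]; simp [sp]
  | case2 c rest hpre ih =>
      -- the scan matched ", ": c :: rest = ',' :: ' ' :: t
      have hp := List.isPrefixOf_iff_prefix.mp hpre
      obtain ⟨t, ht⟩ := hp
      simp at ht
      obtain ⟨hc, hrest⟩ := ht
      subst hc; subst hrest
      rw [reSplit]; simp only [hpre, if_true]
      rw [sp]; simp only [List.isPrefixOf]
      simp [sp]
      simpa using ih
  | case3 c rest hpre hpre2 ih =>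
      -- the scan matched " and ": c :: rest = ' ' :: 'a' :: 'n' :: 'd' :: ' ' :: t
      have hp := List.isPrefixOf_iff_prefix.mp hpre2
      obtain ⟨t, ht⟩ := hp
      simp at ht
      obtain ⟨hc, hrest⟩ := ht
      subst hc; subst hrest
      rw [reSplit]
      simp only [hpre, hpre2, if_true, Bool.false_eq_true, if_false]
      simp only [List.drop_succ_cons, List.drop_zero] at ih ⊢
      rw [show (' '::'a'::'n'::'d'::' '::t) = [' ','a','n','d',' '] ++ t from rfl,
          sp_comma_and_append]
      obtain ⟨h, tl, hs⟩ := sp_shape ',' [' '] t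
      rw [hs]
      simp only [List.modifyHead_cons, List.flatMap_cons, spA_and_append]
      rw [← ih, hs]
      simp
  | case4 c rest hpre hpre2 ih =>
      -- no match at this position
      rw [reSplit]; simp only [hpre, hpre2, Bool.false_eq_true, if_false]
      obtain ⟨h, tl, hs⟩ := sp_shape ',' [' '] rest
      rw [sp, hs]; simp only [hpre, Bool.false_eq_true, if_false, List.modifyHead_cons,
        List.flatMap_cons]
      -- " and " is not a prefix of c :: h either (h is a prefix of rest)
      have hnp : ¬ ([' ','a','n','d',' '] : List Char).isPrefixOf (c :: h) = true := by
        intro hcon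
        have : ([' ','a','n','d',' '] : List Char) <+: c :: rest :=
          (List.isPrefixOf_iff_prefix.mp hcon).trans
            (List.cons_prefix_cons.mpr ⟨rfl, sp_head_prefix ',' [' '] rest hs⟩)
        rw [← List.isPrefixOf_iff_prefix] at this
        simp [this] at hpre2
      obtain ⟨h2, t2, hs2⟩ := sp_shape ' ' ['a','n','d',' '] h
      rw [sp, hs2]; simp only [hnp, Bool.false_eq_true, if_false, List.modifyHead_cons]
      rw [← ih, hs]
      simp [hs2]

-- A's second level: on a string with no ", ", parse is the " and "-split
theorem parseF_base (n : Nat) (s : String)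
    (h1 : PySem.Chars.isIn [',', ' '] s.toList = false)
    (h2 : PySem.Chars.isIn [' ', 'a', 'n', 'd', ' '] s.toList = false) :
    parseF (n + 1) s = [s] := by
  rw [parseF]
  have e1 : (", ".toList) = [',', ' '] := rfl
  have e2 : (" and ".toList) = [' ', 'a', 'n', 'd', ' '] := rfl
  simp only [PySem.Str.isIn, e1, e2, h1, h2, Bool.false_eq_true, if_false]

-- A's second level: on a string with no ", ", parse is exactly the " and "-split
theorem parseF_no_comma (n : Nat) (s : String)
    (h1 : PySem.Chars.isIn [',', ' '] s.toList = false) :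
    parseF (n + 2) s = (sp ' ' ['a','n','d',' '] s.toList).map String.ofList := by
  rw [show n + 2 = Nat.succ (n + 1) from rfl, parseF]
  have e1 : (", ".toList) = [',', ' '] := rfl
  have e2 : (" and ".toList) = (' ' :: ['a','n','d',' ']) := rfl
  simp only [PySem.Str.isIn, e1, e2, h1, Bool.false_eq_true, if_false]
  by_cases h2 : PySem.Chars.isIn (' ' :: ['a','n','d',' ']) s.toList
  · simp only [h2, if_true]
    rw [splitOn_eq_sp]
    rw [PySem.List.foldl_append_eq_flatMap]
    rw [List.flatMap_map]
    have hpieces : ∀ p ∈ sp ' ' ['a','n','d',' '] s.toList,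
        parseF (n + 1) (String.ofList p) = [String.ofList p] := by
      intro p hp
      apply parseF_base
      · rw [PySem.Chars.isIn_eq_false_iff]
        intro hinf
        have : ([',', ' '] : List Char) <:+: s.toList := by
          simp at hinf
          exact hinf.trans (sp_mem_infix _ _ _ p hp)
        rw [← PySem.Chars.isIn_iff_infix] at this
        simp [this] at h1
      · rw [PySem.Chars.isIn_eq_false_iff, String.toList_ofList]
        exact sp_mem_not_infix ' ' ['a','n','d',' '] s.toList p hp
    calc (sp ' ' ['a','n','d',' '] s.toList).flatMap (fun p => parseF (n+1) (String.ofList p))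
        = (sp ' ' ['a','n','d',' '] s.toList).flatMap (fun p => [String.ofList p]) := by
          exact List.flatMap_congr hpieces
      _ = (sp ' ' ['a','n','d',' '] s.toList).map String.ofList := by
          exact Eq.symm List.map_eq_flatMap
  · simp only [h2, Bool.false_eq_true, if_false]
    rw [sp_of_not_infix]
    · simp
    · rw [← PySem.Chars.isIn_iff_infix]
      simp at h2
      simp [h2]

-- ===== VERDICT (by name: the statement is the Claim_ definition above) =====
theorem parse_spec : Claim_equal_parse := by
  intro s _
  unfold Spec_parse parse parse_alt
  rw [← flatMap_sp_eq_reSplit]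
  have e1 : (", ".toList) = (',' :: [' ']) := rfl
  by_cases h1 : PySem.Chars.isIn (',' :: [' ']) s.toList
  · rw [show (3 : Nat) = Nat.succ 2 from rfl, parseF]
    simp only [PySem.Str.isIn, e1, h1, if_true]
    rw [splitOn_eq_sp]
    rw [PySem.List.foldl_append_eq_flatMap]
    rw [List.flatMap_map]
    rw [List.map_flatMap]
    simp only [List.nil_append]
    apply List.flatMap_congr
    intro p hp
    have hnc : PySem.Chars.isIn [',', ' '] (String.ofList p).toList = false := by
      rw [PySem.Chars.isIn_eq_false_iff]
      simp
      exact sp_mem_not_infix ',' [' '] s.toList p hp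
    rw [show (2 : Nat) = 0 + 2 from rfl, parseF_no_comma 0 (String.ofList p) hnc]
    simp
  · have h1' : PySem.Chars.isIn [',', ' '] s.toList = false := by simpa using h1
    rw [show (3 : Nat) = 1 + 2 from rfl, parseF_no_comma 1 s h1']
    rw [sp_of_not_infix ',' [' '] s.toList]
    · simp
    · rw [← PySem.Chars.isIn_iff_infix, h1']
      simp
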